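-- pv_equiv track=rewrite | github.com/allBoo/tp-labs | lab01/lab01.py | remove_even_chains_v1
-- ===== SOURCE A (Python) =====
-- def remove_even_chains_v1(A: list, B: list) -> list:
--     # удаляем из списка A цепочки четных элементов, содержащие элементы из списка B
--     i = 0
--     while i < len(A):
--         if A[i] % 2 == 0:
--             chain_start = i
--             while i < len(A) and A[i] % 2 == 0:
--                 i += 1
--             chain_end = i - 1
--             if any(x in B for x in A[chain_start:chain_end+1]):
--                 del A[chain_start:chain_end+1]
--                 i = chain_start
--         else:
--             i += 1
--
--     return A
-- ===== SOURCE B (Python) =====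
-- def remove_even_chains_v1(A: list, B: list) -> list:
--     # One pass over A: collect each maximal run of even elements; keep the run
--     # only if it is disjoint from B; odd elements are always kept.
--     bad = set(B)
--     result = []
--     run = []
--     for x in A:
--         if x % 2 == 0:
--             run.append(x)
--         else:
--             if not any(y in bad for y in run):
--                 result.extend(run)
--             run = []
--             result.append(x)
--     if not any(y in bad for y in run):
--         result.extend(run)
--     A[:] = result
--     return A
-- ===== Notes on version B (the rewrite author's own statement) =====
-- stated objective: faster
-- what changed: Replaces the index-based while loop with in-place slice deletion and backtracking rescans by a single forward pass that groups maximal even runs, keeps a run only when disjoint from set(B), and writes the result back with A[:] = result.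
import Mathlib
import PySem

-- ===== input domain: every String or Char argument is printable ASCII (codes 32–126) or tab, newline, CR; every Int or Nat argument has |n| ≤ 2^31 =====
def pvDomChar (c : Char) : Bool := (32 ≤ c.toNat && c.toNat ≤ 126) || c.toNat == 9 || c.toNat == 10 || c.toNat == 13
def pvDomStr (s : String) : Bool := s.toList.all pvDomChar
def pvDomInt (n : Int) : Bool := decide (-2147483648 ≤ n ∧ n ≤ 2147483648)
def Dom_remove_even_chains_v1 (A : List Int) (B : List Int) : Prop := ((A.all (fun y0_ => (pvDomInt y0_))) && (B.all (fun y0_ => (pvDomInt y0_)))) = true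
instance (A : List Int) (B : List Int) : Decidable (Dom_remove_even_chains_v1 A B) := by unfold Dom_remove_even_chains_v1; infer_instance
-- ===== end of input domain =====

-- B replaces A's index/splice while-loop by one forward pass over maximal even runs (objective: faster; a timing run measured it).
-- Both Pythons mutate A in place to the same final list and return it; the equivalence proved is about the return value.

-- ===== PORT A =====
-- x % 2 == 0 (Python %)
def pyEven (x : Int) : Bool := PySem.Int.mod x 2 == 0

-- inner 'while i < len(A) and A[i] % 2 == 0: i += 1'
def scanEvenA (A : List Int) (i : Nat) : Nat :=
  if h : i < A.length then
    if pyEven A[i] then scanEvenA A (i + 1) else i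
  else i
termination_by A.length - i
decreasing_by exact Nat.sub_lt_sub_left h (Nat.lt_succ_self i)

-- measure facts cited by loopA's decreasing_by (kept tiny)
theorem loopA_dec1 (A : List Int) (i : Nat) (h : i < A.length) (hj : i < scanEvenA A i) :
    (A.take i ++ A.drop (scanEvenA A i)).length - i < A.length - i := by
  rw [List.length_append, List.length_take, List.length_drop,
    Nat.min_eq_left (Nat.le_of_lt h), Nat.add_sub_cancel_left]
  exact Nat.sub_lt_sub_left h hj

theorem scanEvenA_ge (A : List Int) (i : Nat) : i ≤ scanEvenA A i := by
  induction i using scanEvenA.induct (A := A) with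
  | case1 i h he ih => rw [scanEvenA]; simp only [h, dite_true, he, if_true]; omega
  | case2 i h he => rw [scanEvenA]; simp [h, he]
  | case3 i h => rw [scanEvenA]; simp [h]

theorem scanEvenA_gt (A : List Int) (i : Nat) (h : i < A.length) (he : pyEven A[i] = true) :
    i < scanEvenA A i := by
  rw [scanEvenA]; simp only [h, dite_true, he, if_true]
  exact Nat.lt_of_lt_of_le (Nat.lt_succ_self i) (scanEvenA_ge A (i + 1))

-- outer while loop; state = (current list, index i).
-- Python's slice A[chain_start:chain_end+1] with 0 ≤ i ≤ j ≤ len(A) is exactly (A.drop i).take (j - i),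
-- and 'del A[chain_start:chain_end+1]' leaves exactly A.take i ++ A.drop j.
def loopA (A : List Int) (B : List Int) (i : Nat) : List Int :=
  if h : i < A.length then
    if pyEven A[i] then
      if ((A.drop i).take (scanEvenA A i - i)).any (fun x => decide (x ∈ B)) then
        loopA (A.take i ++ A.drop (scanEvenA A i)) B i
      else
        loopA A B (scanEvenA A i)
    else
      loopA A B (i + 1)
  else A
termination_by A.length - i
decreasing_by
  · exact loopA_dec1 A i h (scanEvenA_gt A i h (by assumption))
  · exact Nat.sub_lt_sub_left h (scanEvenA_gt A i h (by assumption))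
  · exact Nat.sub_lt_sub_left h (Nat.lt_succ_self i)

def remove_even_chains_v1 (A : List Int) (B : List Int) : List Int := loopA A B 0

-- ===== PORT B =====
-- one step of Source B's for-loop; state = (result, run)
def stepB (bad : PySem.Set Int) (s : List Int × List Int) (x : Int) : List Int × List Int :=
  if pyEven x then (s.1, s.2 ++ [x])
  else ((if s.2.any (fun y => PySem.Set.contains bad y) then s.1 else s.1 ++ s.2) ++ [x], [])

def remove_even_chains_v1_alt (A : List Int) (B : List Int) : List Int :=
  let bad := PySem.Set.ofList B
  let s := A.foldl (stepB bad) ([], [])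
  if s.2.any (fun y => PySem.Set.contains bad y) then s.1 else s.1 ++ s.2

-- ===== PRECONDITION & SPEC =====
def Spec_remove_even_chains_v1 (A : List Int) (B : List Int) (out : List Int) : Prop := out = remove_even_chains_v1_alt A B
instance (A : List Int) (B : List Int) (out : List Int) : Decidable (Spec_remove_even_chains_v1 A B out) := by unfold Spec_remove_even_chains_v1; infer_instance

-- ===== CLAIM (what is proved, stated in full; the proofs are below) =====
def Claim_equal_remove_even_chains_v1 : Prop := ∀ (A : List Int) (B : List Int), Dom_remove_even_chains_v1 A B → Spec_remove_even_chains_v1 A B (remove_even_chains_v1 A B)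

-- ===== LEMMAS AND PROOFS =====

theorem scanEvenA_le (A : List Int) (i : Nat) (hi : i ≤ A.length) : scanEvenA A i ≤ A.length := by
  induction i using scanEvenA.induct (A := A) with
  | case1 i h he ih => rw [scanEvenA]; simp only [h, dite_true, he, if_true]; exact ih (by omega)
  | case2 i h he => rw [scanEvenA]; simp only [h, dite_true, he, Bool.false_eq_true, if_false]; omega
  | case3 i h => rw [scanEvenA]; simp only [h, dite_false]; omega


theorem scanEvenA_stop (A : List Int) (i : Nat) : pyEven (A.getD (scanEvenA A i) 1) = false := by
  induction i using scanEvenA.induct (A := A) with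
  | case1 i h he ih => rw [scanEvenA]; simpa [h, he] using ih
  | case2 i h he =>
      rw [scanEvenA]; simp only [h, dite_true, he, Bool.false_eq_true, if_false]
      simp only [List.getD, List.getElem?_eq_getElem h, Option.getD_some]
      simpa using he
  | case3 i h =>
      rw [scanEvenA]; simp only [h, dite_false]
      have hle : A.length ≤ i := Nat.le_of_not_lt h
      rw [List.getD_eq_default _ _ (by omega)]
      decide

theorem scanEvenA_mem (A : List Int) (i : Nat) :
    ∀ k, i ≤ k → k < scanEvenA A i → pyEven (A.getD k 1) = true := by
  induction i using scanEvenA.induct (A := A) with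
  | case1 i h he ih =>
      intro k hk1 hk2
      rw [scanEvenA] at hk2; simp only [h, dite_true, he, if_true] at hk2
      rcases Nat.eq_or_lt_of_le hk1 with rfl | hlt
      · simp only [List.getD, List.getElem?_eq_getElem h, Option.getD_some]; exact he
      · exact ih k hlt hk2
  | case2 i h he => intro k hk1 hk2; rw [scanEvenA] at hk2; simp [h, he] at hk2; omega
  | case3 i h => intro k hk1 hk2; rw [scanEvenA] at hk2; simp [h] at hk2; omega


-- common reference function: process the remaining list with a pending even run
def coreC (B : List Int) (run : List Int) (xs : List Int) : List Int :=
  match xs with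
  | [] => if run.any (fun y => decide (y ∈ B)) then [] else run
  | x :: rest =>
      if pyEven x then coreC B (run ++ [x]) rest
      else (if run.any (fun y => decide (y ∈ B)) then [] else run) ++ x :: coreC B [] rest

theorem contains_ofList (B : List Int) (y : Int) :
    PySem.Set.contains (PySem.Set.ofList B) y = decide (y ∈ B) := by
  simp [PySem.Set.contains, PySem.Set.mem_ofList]

theorem foldB (B : List Int) : ∀ (xs out run : List Int),
    (if ((xs.foldl (stepB (PySem.Set.ofList B)) (out, run)).2.any fun y => decide (y ∈ B)) = true
     then (xs.foldl (stepB (PySem.Set.ofList B)) (out, run)).1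
     else (xs.foldl (stepB (PySem.Set.ofList B)) (out, run)).1 ++ (xs.foldl (stepB (PySem.Set.ofList B)) (out, run)).2)
    = out ++ coreC B run xs := by
  intro xs
  induction xs with
  | nil =>
      intro out run
      simp only [List.foldl_nil, coreC]
      split <;> simp
  | cons x rest ih =>
      intro out run
      simp only [List.foldl_cons, stepB, contains_ofList, coreC]
      by_cases he : pyEven x = true
      · simp only [he, if_true]; exact ih out (run ++ [x])
      · simp only [he, Bool.false_eq_true, if_false]
        rw [ih]
        split <;> simp

theorem core_absorb (B : List Int) : ∀ (ev run rest : List Int),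
    (∀ x ∈ ev, pyEven x = true) → coreC B run (ev ++ rest) = coreC B (run ++ ev) rest := by
  intro ev
  induction ev with
  | nil => intro run rest _; simp
  | cons x xs ih =>
      intro run rest h
      simp only [List.cons_append, coreC, h x (by simp), if_true]
      rw [ih (run ++ [x]) rest (fun y hy => h y (by simp [hy]))]
      simp

theorem core_start (B : List Int) (run rest : List Int)
    (h : rest = [] ∨ ∃ x r, rest = x :: r ∧ pyEven x = false) :
    coreC B run rest = (if run.any (fun y => decide (y ∈ B)) then [] else run) ++ coreC B [] rest := by
  rcases h with rfl | ⟨x, r, rfl, hx⟩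
  · simp only [coreC]; split <;> simp
  · simp only [coreC, hx, Bool.false_eq_true, if_false, List.any_nil, List.nil_append]

theorem chain_even (A : List Int) (i : Nat) :
    ∀ x ∈ (A.drop i).take (scanEvenA A i - i), pyEven x = true := by
  intro x hx
  rw [List.mem_iff_getElem] at hx
  obtain ⟨k, hk, hkx⟩ := hx
  have hk1 : k < scanEvenA A i - i := Nat.lt_of_lt_of_le hk (by simp [List.length_take])
  have hk2 : i + k < A.length := by
    have := List.length_take_le (scanEvenA A i - i) (A.drop i)
    simp [List.length_take, List.length_drop] at hk ⊢
    omega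
  have : x = A[i + k] := by
    rw [List.getElem_take, List.getElem_drop] at hkx
    exact hkx.symm
  subst this
  have := scanEvenA_mem A i (i + k) (by omega) (by omega)
  simpa [List.getD, hk2] using this

theorem loopA_eq (A B : List Int) (i : Nat) (hi : i ≤ A.length)
    (hyp : i = 0 ∨ pyEven (A.getD (i - 1) 1) = false ∨ pyEven (A.getD i 1) = false) :
    loopA A B i = A.take i ++ coreC B [] (A.drop i) := by
  revert hi hyp
  induction A, i using loopA.induct (B := B) with
  | case1 A i h he hbad ih =>
      -- even run containing a B element: delete it and restart at i
      intro hi hyp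
      have hj1 : i < scanEvenA A i := scanEvenA_gt A i h he
      have hj2 : scanEvenA A i ≤ A.length := scanEvenA_le A i (Nat.le_of_lt h)
      rw [loopA]; simp only [h, dite_true, he, if_true, hbad, if_true]
      have hlen : i ≤ (A.take i ++ A.drop (scanEvenA A i)).length := by
        simp [List.length_append, List.length_take, List.length_drop]; omega
      have hyp' : i = 0 ∨ pyEven ((A.take i ++ A.drop (scanEvenA A i)).getD (i - 1) 1) = false ∨
          pyEven ((A.take i ++ A.drop (scanEvenA A i)).getD i 1) = false := by
        by_cases hi0 : i = 0
        · exact Or.inl hi0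
        · rcases hyp with h0 | hprev | hcur
          · exact Or.inl h0
          · refine Or.inr (Or.inl ?_)
            have h1 : i - 1 < (A.take i).length := by simp [List.length_take]; omega
            simp only [List.getD_eq_getElem?_getD] at hprev ⊢
            rw [List.getElem?_append_left h1, List.getElem?_take_of_lt (by omega)]
            exact hprev
          · exfalso; rw [List.getD, List.getElem?_eq_getElem h] at hcur; simp [he] at hcur
      rw [ih hlen hyp']
      have htake : (A.take i ++ A.drop (scanEvenA A i)).take i = A.take i := by
        rw [List.take_append_of_le_length (by simp [List.length_take]; omega)]
        simp [List.take_take]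
      have hdrop : (A.take i ++ A.drop (scanEvenA A i)).drop i = A.drop (scanEvenA A i) := by
        rw [List.drop_append_of_le_length (by simp [List.length_take]; omega)]
        simp
      rw [htake, hdrop]
      have hcond : A.drop (scanEvenA A i) = [] ∨
          ∃ x r, A.drop (scanEvenA A i) = x :: r ∧ pyEven x = false := by
        rcases Nat.eq_or_lt_of_le hj2 with heq | hlt
        · left; simp [heq]
        · right
          refine ⟨A[scanEvenA A i], A.drop (scanEvenA A i + 1), List.drop_eq_getElem_cons hlt, ?_⟩
          have := scanEvenA_stop A i
          simpa [List.getD, List.getElem?_eq_getElem hlt] using this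
      have hrhs : coreC B [] (A.drop i) =
          (if (((A.drop i).take (scanEvenA A i - i)).any fun y => decide (y ∈ B)) = true
           then [] else (A.drop i).take (scanEvenA A i - i)) ++ coreC B [] (A.drop (scanEvenA A i)) := by
        conv_lhs => rw [show A.drop i = (A.drop i).take (scanEvenA A i - i) ++ A.drop (scanEvenA A i) by
          conv_lhs => rw [← List.take_append_drop (scanEvenA A i - i) (A.drop i)]
          rw [List.drop_drop]; congr 2; omega]
        rw [core_absorb B _ [] _ (chain_even A i), List.nil_append, core_start B _ _ hcond]
      rw [hrhs, if_pos hbad, List.nil_append]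
  | case2 A i h he hbad ih =>
      -- even run disjoint from B: keep it, continue after it
      intro hi hyp
      have hj1 : i < scanEvenA A i := scanEvenA_gt A i h he
      have hj2 : scanEvenA A i ≤ A.length := scanEvenA_le A i (Nat.le_of_lt h)
      rw [loopA]; simp only [h, dite_true, he, if_true, if_neg hbad]
      rw [ih hj2 (Or.inr (Or.inr (scanEvenA_stop A i)))]
      have hcond : A.drop (scanEvenA A i) = [] ∨
          ∃ x r, A.drop (scanEvenA A i) = x :: r ∧ pyEven x = false := by
        rcases Nat.eq_or_lt_of_le hj2 with heq | hlt
        · left; simp [heq]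
        · right
          refine ⟨A[scanEvenA A i], A.drop (scanEvenA A i + 1), List.drop_eq_getElem_cons hlt, ?_⟩
          have := scanEvenA_stop A i
          simpa [List.getD, List.getElem?_eq_getElem hlt] using this
      have hrhs : coreC B [] (A.drop i) =
          (if (((A.drop i).take (scanEvenA A i - i)).any fun y => decide (y ∈ B)) = true
           then [] else (A.drop i).take (scanEvenA A i - i)) ++ coreC B [] (A.drop (scanEvenA A i)) := by
        conv_lhs => rw [show A.drop i = (A.drop i).take (scanEvenA A i - i) ++ A.drop (scanEvenA A i) by
          conv_lhs => rw [← List.take_append_drop (scanEvenA A i - i) (A.drop i)]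
          rw [List.drop_drop]; congr 2; omega]
        rw [core_absorb B _ [] _ (chain_even A i), List.nil_append, core_start B _ _ hcond]
      rw [hrhs, if_neg hbad]
      have htj : A.take (scanEvenA A i) = A.take i ++ (A.drop i).take (scanEvenA A i - i) := by
        have hs : scanEvenA A i = i + (scanEvenA A i - i) := by omega
        rw [hs, List.take_add]
        simp
      rw [htj, List.append_assoc]
  | case3 A i h he ih =>
      -- odd element: it is emitted unchanged
      intro hi hyp
      rw [loopA]; simp only [h, dite_true, if_neg he]
      have hyp' : i + 1 = 0 ∨ pyEven (A.getD (i + 1 - 1) 1) = false ∨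
          pyEven (A.getD (i + 1) 1) = false := by
        right; left
        simp only [Nat.add_sub_cancel, List.getD, List.getElem?_eq_getElem h, Option.getD_some]
        simpa using he
      rw [ih h hyp']
      conv_rhs => rw [List.drop_eq_getElem_cons h]
      simp only [coreC, if_neg he, List.any_nil, Bool.false_eq_true, if_false, List.nil_append]
      rw [← List.take_append_getElem h, List.append_assoc]
      rfl
  | case4 A i h =>
      intro hi hyp
      have : i = A.length := by omega
      subst this
      rw [loopA]; simp [coreC]

-- ===== VERDICT (by name: the statement is the Claim_ definition above) =====
theorem remove_even_chains_v1_spec : Claim_equal_remove_even_chains_v1 := by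
  intro A B _
  unfold Spec_remove_even_chains_v1 remove_even_chains_v1 remove_even_chains_v1_alt
  simp only [contains_ofList]
  rw [foldB B A [] []]
  rw [loopA_eq A B 0 (Nat.zero_le _) (Or.inl rfl)]
  simp
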